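-- pv_equiv track=rewrite | github.com/majewski-jacek/Sololearn_Code_Coach-edabit_challenges | edabit challenges/Steps to a Palindrome.py | min_palindrome_steps
-- ===== SOURCE A (Python) =====
-- def min_palindrome_steps(txt):
--     reverse_txt = txt[::-1]
--     steps = 0
--
--     while True:
--         if txt == reverse_txt:
--             return steps
--
--         else:
--             txt = txt[1:]
--             reverse_txt = reverse_txt[:-1]
--             steps += 1
-- ===== SOURCE B (Python) =====
-- def min_palindrome_steps(txt):
--     # KMP failure function on rev(txt) + NUL + txt: the final prefix-function
--     # value is the length of the longest palindromic suffix of txt.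
--     # (NUL separator never occurs in the printable-ASCII input domain.)
--     n = len(txt)
--     s = txt[::-1] + "\x00" + txt
--     k = 0
--     f = [0] * len(s)
--     for i in range(1, len(s)):
--         while k > 0 and s[i] != s[k]:
--             k = f[k - 1]
--         if s[i] == s[k]:
--             k += 1
--         f[i] = k
--     return n - k
-- ===== Notes on version B (the rewrite author's own statement) =====
-- stated objective: faster
-- what changed: Replaces the trim-and-compare loop (rebuilding a slice and its reverse each step) by a single KMP failure-function pass over rev(txt)+NUL+txt whose final value is the longest palindromic suffix length.
import Mathlib
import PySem

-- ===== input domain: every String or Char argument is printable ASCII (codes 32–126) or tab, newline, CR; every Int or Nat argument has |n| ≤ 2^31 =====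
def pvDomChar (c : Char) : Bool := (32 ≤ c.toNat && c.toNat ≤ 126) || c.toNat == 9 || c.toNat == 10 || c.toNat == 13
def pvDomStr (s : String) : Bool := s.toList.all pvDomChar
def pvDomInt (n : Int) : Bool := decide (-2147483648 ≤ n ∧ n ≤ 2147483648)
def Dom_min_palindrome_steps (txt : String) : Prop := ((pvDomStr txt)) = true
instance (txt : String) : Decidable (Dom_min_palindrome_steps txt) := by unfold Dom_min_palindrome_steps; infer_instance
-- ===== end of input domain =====

-- B replaces A's quadratic trim-and-compare loop by one KMP failure-function pass
-- over rev(txt) + NUL + txt (objective: faster; NUL never occurs in the ASCII domain).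

-- ===== PORT A =====
-- the while-loop of A: state (txt, reverse_txt, steps); txt[1:] = drop 1, reverse_txt[:-1] = dropLast (exact)
def aLoop (t r : List Char) (steps : Int) : Int :=
  if t = r then steps
  else aLoop (t.drop 1) r.dropLast (steps + 1)
termination_by t.length + r.length
decreasing_by
  have ht : t ≠ [] ∨ r ≠ [] := by
    by_contra h; push Not at h; rename_i hne; exact hne (h.1.trans h.2.symm)
  rcases ht with h | h <;>
    · have := List.length_pos_of_ne_nil h
      simp [List.length_dropLast]; omega

def min_palindrome_steps (txt : String) : Int :=
  -- txt[::-1] = reverse (exact on the list of characters)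
  aLoop txt.toList txt.toList.reverse 0

-- ===== PORT B =====
def pvSep : Char := Char.ofNat 0   -- the "\x00" separator of Source B

-- the inner `while k > 0 and s[i] != s[k]: k = f[k-1]`; fuel (initially k) is only a
-- totality guard: f[k-1] < k throughout, so the loop body runs at most k times
def kmpWhile (s : List Char) (f : List Nat) (c : Char) : Nat → Nat → Nat
  | 0, k => k
  | fuel + 1, k =>
      if 0 < k ∧ s.getD k pvSep ≠ c then kmpWhile s f c fuel (f.getD (k - 1) 0) else k

-- one iteration of the `for i in range(1, len(s))` body, state = (f, k)
def kmpStep (s : List Char) (st : List Nat × Nat) (i : Nat) : List Nat × Nat :=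
  let k1 := kmpWhile s st.1 (s.getD i pvSep) st.2 st.2
  let k2 := if s.getD i pvSep = s.getD k1 pvSep then k1 + 1 else k1
  (st.1.set i k2, k2)

def min_palindrome_steps_alt (txt : String) : Int :=
  let t := txt.toList
  let n := t.length
  let s := t.reverse ++ [pvSep] ++ t
  let st := (List.range' 1 (s.length - 1)).foldl (kmpStep s) (List.replicate s.length 0, 0)
  (n : Int) - (st.2 : Int)

-- ===== PRECONDITION & SPEC =====
def Spec_min_palindrome_steps (txt : String) (out : Int) : Prop := out = min_palindrome_steps_alt txt
instance (txt : String) (out : Int) : Decidable (Spec_min_palindrome_steps txt out) := by unfold Spec_min_palindrome_steps; infer_instance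

-- ===== CLAIM (what is proved, stated in full; the proofs are below) =====
def Claim_equal_min_palindrome_steps : Prop := ∀ (txt : String), Dom_min_palindrome_steps txt → Spec_min_palindrome_steps txt (min_palindrome_steps txt)

-- ===== LEMMAS AND PROOFS =====

-- `L` is a border of the prefix of `l` of length `p`: a proper prefix that is also a suffix,
-- stated pointwise on characters.
abbrev Border (l : List Char) (p L : Nat) : Prop :=
  L < p ∧ ∀ j, j < L → l.getD j pvSep = l.getD (p - L + j) pvSep

-- the longest border of the prefix of length `p` (Python's failure value f[p-1])
def Fv (l : List Char) (p : Nat) : Nat := Nat.findGreatest (fun L => Border l p L) (p - 1)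

lemma border_zero (l : List Char) {p : Nat} (hp : 0 < p) : Border l p 0 :=
  ⟨hp, fun j hj => absurd hj (Nat.not_lt_zero j)⟩

lemma Fv_border (l : List Char) {p : Nat} (hp : 0 < p) : Border l p (Fv l p) :=
  Nat.findGreatest_spec (Nat.zero_le _) (border_zero l hp)

lemma Fv_lt (l : List Char) {p : Nat} (hp : 0 < p) : Fv l p < p := by
  have := Nat.findGreatest_le (P := fun L => Border l p L) (p - 1)
  unfold Fv; omega

lemma le_Fv (l : List Char) {p L : Nat} (h : Border l p L) : L ≤ Fv l p :=
  Nat.le_findGreatest (by omega) h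

lemma border_nest (l : List Char) {p b b' : Nat} (hb : Border l p b) (hb' : Border l p b')
    (h : b < b') : Border l b' b := by
  refine ⟨h, fun j hj => ?_⟩
  have h1 := hb.2 j hj
  have h2 := hb'.2 (b' - b + j) (by omega)
  have e : p - b' + (b' - b + j) = p - b + j := by omega
  rw [e] at h2
  exact h1.trans h2.symm

lemma border_trans (l : List Char) {p k a : Nat} (ha : Border l k a) (hk : Border l p k) :
    Border l p a := by
  refine ⟨by omega, fun j hj => ?_⟩
  have h1 := ha.2 j hj
  have h2 := hk.2 (k - a + j) (by omega)
  have e : p - k + (k - a + j) = p - a + j := by omega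
  rw [e] at h2
  exact h1.trans h2

lemma border_ext (l : List Char) {p L : Nat} :
    Border l (p + 1) (L + 1) ↔
      Border l p L ∧ l.getD L pvSep = l.getD p pvSep := by
  constructor
  · rintro ⟨hlt, hpt⟩
    have hLp : L < p := by omega
    refine ⟨⟨hLp, fun j hj => ?_⟩, ?_⟩
    · have := hpt j (by omega)
      have e : p + 1 - (L + 1) + j = p - L + j := by omega
      rwa [e] at this
    · have := hpt L (by omega)
      have e : p + 1 - (L + 1) + L = p := by omega
      rwa [e] at this
  · rintro ⟨⟨hLp, hb⟩, hc⟩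
    refine ⟨by omega, fun j hj => ?_⟩
    have e : p + 1 - (L + 1) + j = p - L + j := by omega
    rw [e]
    rcases Nat.lt_or_ge j L with hjL | hjL
    · exact hb j hjL
    · have hjL' : j = L := by omega
      subst hjL'
      have e2 : p - j + j = p := by omega
      rw [e2]; exact hc

lemma kmpWhile_spec (l : List Char) (f : List Nat) (i : Nat) (hi : 0 < i)
    (hf : ∀ j, j < i → f.getD j 0 = Fv l (j + 1)) :
    ∀ fuel k, k ≤ fuel → Border l i k →
      Border l i (kmpWhile l f (l.getD i pvSep) fuel k) ∧
      (kmpWhile l f (l.getD i pvSep) fuel k = 0 ∨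
        l.getD (kmpWhile l f (l.getD i pvSep) fuel k) pvSep = l.getD i pvSep) ∧
      (∀ b, Border l i b → b ≤ k → l.getD b pvSep = l.getD i pvSep →
        b ≤ kmpWhile l f (l.getD i pvSep) fuel k) := by
  intro fuel
  induction fuel with
  | zero =>
    intro k hk hb
    have hk0 : k = 0 := by omega
    subst hk0
    exact ⟨hb, Or.inl rfl, fun b _ hble _ => hble⟩
  | succ fuel ih =>
    intro k hk hb
    by_cases hcond : 0 < k ∧ l.getD k pvSep ≠ l.getD i pvSep
    · have hki : k < i := hb.1
      have hfk : f.getD (k - 1) 0 = Fv l k := by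
        have := hf (k - 1) (by omega)
        rwa [Nat.sub_add_cancel hcond.1] at this
      have hFlt : Fv l k < k := Fv_lt l hcond.1
      have hFb : Border l i (Fv l k) :=
        border_trans l (Fv_border l hcond.1) hb
      have hrec : kmpWhile l f (l.getD i pvSep) (fuel + 1) k =
          kmpWhile l f (l.getD i pvSep) fuel (Fv l k) := by
        rw [kmpWhile, if_pos hcond, hfk]
      obtain ⟨H1, H2, H3⟩ := ih (Fv l k) (by omega) hFb
      rw [hrec]
      refine ⟨H1, H2, fun b hbb hble hmatch => ?_⟩
      have hbk : b ≠ k := fun he => hcond.2 (he ▸ hmatch)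
      have hblt : b < k := by omega
      have : Border l k b := border_nest l hbb hb hblt
      exact H3 b hbb (le_Fv l this) hmatch
    · have hrec : kmpWhile l f (l.getD i pvSep) (fuel + 1) k = k := by
        rw [kmpWhile, if_neg hcond]
      rw [hrec]
      refine ⟨hb, ?_, fun b _ hble _ => hble⟩
      rcases Nat.eq_zero_or_pos k with h0 | hpos
      · exact Or.inl h0
      · right
        by_contra hne
        exact hcond ⟨hpos, hne⟩

lemma Fv_succ (l : List Char) {i r : Nat} (hi : 0 < i) (hr : Border l i r)
    (hmatch : r = 0 ∨ l.getD r pvSep = l.getD i pvSep)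
    (hmax : ∀ b, Border l i b → l.getD b pvSep = l.getD i pvSep → b ≤ r) :
    Fv l (i + 1) = if l.getD i pvSep = l.getD r pvSep then r + 1 else r := by
  by_cases hc : l.getD i pvSep = l.getD r pvSep
  · rw [if_pos hc]
    apply Nat.le_antisymm
    · rcases Nat.eq_zero_or_pos (Fv l (i + 1)) with h0 | hpos
      · omega
      · have hFb : Border l (i + 1) (Fv l (i + 1)) := Fv_border l (by omega)
        obtain ⟨B, hB⟩ : ∃ B, Fv l (i + 1) = B + 1 := ⟨Fv l (i + 1) - 1, by omega⟩
        rw [hB] at hFb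
        obtain ⟨hBb, hBc⟩ := (border_ext l).mp hFb
        have := hmax B hBb hBc
        omega
    · exact le_Fv l ((border_ext l).mpr ⟨hr, hc.symm⟩)
  · rw [if_neg hc]
    have hr0 : r = 0 := by
      rcases hmatch with h0 | hm
      · exact h0
      · exact absurd hm.symm hc
    subst hr0
    rcases Nat.eq_zero_or_pos (Fv l (i + 1)) with h0 | hpos
    · exact h0
    · exfalso
      have hFb : Border l (i + 1) (Fv l (i + 1)) := Fv_border l (by omega)
      obtain ⟨B, hB⟩ : ∃ B, Fv l (i + 1) = B + 1 := ⟨Fv l (i + 1) - 1, by omega⟩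
      rw [hB] at hFb
      obtain ⟨hBb, hBc⟩ := (border_ext l).mp hFb
      have hB0 : B = 0 := by have := hmax B hBb hBc; omega
      subst hB0
      exact hc hBc.symm

lemma Fv_one (l : List Char) : Fv l 1 = 0 := by
  unfold Fv
  simp [Nat.findGreatest]

lemma kmpLoop_inv (l : List Char) :
    ∀ c, c + 1 ≤ l.length →
      ((List.range' 1 c).foldl (kmpStep l) (List.replicate l.length 0, 0)).1.length = l.length ∧
      ((List.range' 1 c).foldl (kmpStep l) (List.replicate l.length 0, 0)).2 = Fv l (c + 1) ∧
      (∀ j, j ≤ c →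
        ((List.range' 1 c).foldl (kmpStep l) (List.replicate l.length 0, 0)).1.getD j 0 =
          Fv l (j + 1)) := by
  intro c
  induction c with
  | zero =>
    intro hc
    refine ⟨by simp, by simpa using (Fv_one l).symm, fun j hj => ?_⟩
    have hj0 : j = 0 := by omega
    subst hj0
    simp only [List.range', List.foldl_nil]
    rw [List.getD_replicate _ (by omega), Fv_one]
  | succ c ih =>
    intro hc
    obtain ⟨ihlen, ihk, ihf⟩ := ih (by omega)
    set st := (List.range' 1 c).foldl (kmpStep l) (List.replicate l.length 0, 0) with hst
    have hconcat : (List.range' 1 (c + 1)).foldl (kmpStep l) (List.replicate l.length 0, 0) =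
        kmpStep l st (1 + c) := by
      rw [List.range'_1_concat, List.foldl_append, List.foldl_cons, List.foldl_nil]
    have hi : 0 < 1 + c := by omega
    have hfj : ∀ j, j < 1 + c → st.1.getD j 0 = Fv l (j + 1) := fun j hj => ihf j (by omega)
    have hkF : st.2 = Fv l (1 + c) := by rw [ihk]; ring_nf
    obtain ⟨H1, H2, H3⟩ :=
      kmpWhile_spec l st.1 (1 + c) hi hfj st.2 st.2 le_rfl (hkF ▸ Fv_border l hi)
    have hmax : ∀ b, Border l (1 + c) b →
        l.getD b pvSep = l.getD (1 + c) pvSep →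
        b ≤ kmpWhile l st.1 (l.getD (1 + c) pvSep) st.2 st.2 := by
      intro b hbb hm
      exact H3 b hbb (hkF ▸ le_Fv l hbb) hm
    set r := kmpWhile l st.1 (l.getD (1 + c) pvSep) st.2 st.2 with hr
    have hFsucc := Fv_succ l hi H1 H2 hmax
    set k2 := if l.getD (1 + c) pvSep = l.getD r pvSep then r + 1 else r with hk2
    have hstep : kmpStep l st (1 + c) = (st.1.set (1 + c) k2, k2) := rfl
    have hFS : Fv l (c + 1 + 1) = k2 := by
      rw [show c + 1 + 1 = (1 + c) + 1 by omega, hFsucc]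
    refine ⟨?_, ?_, ?_⟩
    · rw [hconcat, hstep]
      simpa using ihlen
    · rw [hconcat, hstep, hFS]
    · intro j hj
      rw [hconcat, hstep]
      by_cases hji : j = 1 + c
      · subst hji
        simp only [List.getD_eq_getElem?_getD]
        rw [List.getElem?_set_self (by omega : 1 + c < st.1.length)]
        rw [show 1 + c + 1 = c + 1 + 1 by omega, hFS]
        rfl
      · simp only [List.getD_eq_getElem?_getD]
        rw [List.getElem?_set_ne (by omega : 1 + c ≠ j)]
        have := ihf j (by omega)
        simpa [List.getD_eq_getElem?_getD] using this

-- ===== A-side characterisation =====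

lemma pal_exists (t : List Char) : ∃ k, t.drop k = (t.drop k).reverse :=
  ⟨t.length, by simp⟩

lemma rev_drop_one (t : List Char) : (t.drop 1).reverse = t.reverse.dropLast := by
  cases t <;> simp

lemma aLoop_eq (t : List Char) (steps : Int) :
    aLoop t t.reverse steps = steps + (Nat.find (pal_exists t) : Int) := by
  have H : ∀ N t steps, t.length ≤ N →
      aLoop t t.reverse steps = steps + (Nat.find (pal_exists t) : Int) := by
    intro N
    induction N with
    | zero =>
      intro t steps ht
      have ht0 : t = [] := by
        cases t with
        | nil => rfl
        | cons a l => simp at ht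
      subst ht0
      rw [aLoop]
      simp
    | succ N ihN =>
      intro t steps ht
      by_cases hp : t = t.reverse
      · rw [aLoop, if_pos hp]
        have : Nat.find (pal_exists t) = 0 :=
          (Nat.find_eq_zero _).mpr (by simpa using hp)
        simp [this]
      · have htne : t ≠ [] := fun h => hp (by simp [h])
        have hlen : (t.drop 1).length ≤ N := by
          have := List.length_pos_of_ne_nil htne
          simp only [List.length_drop]; omega
        rw [aLoop, if_neg hp, ← rev_drop_one]
        rw [ihN (t.drop 1) (steps + 1) hlen]
        have hfind : Nat.find (pal_exists t) = Nat.find (pal_exists (t.drop 1)) + 1 := by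
          rw [Nat.find_eq_iff]
          constructor
          · have := Nat.find_spec (pal_exists (t.drop 1))
            rwa [List.drop_drop, Nat.add_comm] at this
          · intro k hk hQ
            cases k with
            | zero => simp only [List.drop_zero] at hQ; exact hp hQ
            | succ j =>
              rw [show j + 1 = 1 + j by omega, ← List.drop_drop] at hQ
              have := Nat.find_min' (pal_exists (t.drop 1)) hQ
              omega
        rw [hfind]
        push_cast
        ring
  exact H t.length t steps le_rfl

-- ===== correspondence between borders of s and palindromic suffixes of t =====

lemma s_len (t : List Char) : (t.reverse ++ [pvSep] ++ t).length = t.length + 1 + t.length := by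
  simp; omega

lemma s_getD_left (t : List Char) {j : Nat} (hj : j < t.length) :
    (t.reverse ++ [pvSep] ++ t).getD j pvSep = t.getD (t.length - 1 - j) pvSep := by
  rw [List.getD_eq_getElem?_getD, List.getD_eq_getElem?_getD,
    List.getElem?_append_left (by simp; omega),
    List.getElem?_append_left (by simp; omega),
    List.getElem?_reverse (by omega)]

lemma s_getD_mid (t : List Char) :
    (t.reverse ++ [pvSep] ++ t).getD t.length pvSep = pvSep := by
  rw [List.getD_eq_getElem?_getD,
    List.getElem?_append_left (by simp),
    List.getElem?_append_right (by simp)]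
  simp

lemma s_getD_right (t : List Char) {j : Nat} (_hj : j < t.length) :
    (t.reverse ++ [pvSep] ++ t).getD (t.length + 1 + j) pvSep = t.getD j pvSep := by
  rw [List.getD_eq_getElem?_getD, List.getD_eq_getElem?_getD,
    List.getElem?_append_right (by simp)]
  simp

lemma getD_ne_sep (t : List Char) (hsep : pvSep ∉ t) {j : Nat} (hj : j < t.length) :
    t.getD j pvSep ≠ pvSep := by
  rw [List.getD_eq_getElem _ _ hj]
  exact fun h => hsep (h ▸ List.getElem_mem hj)

lemma border_le_n (t : List Char) (hsep : pvSep ∉ t) {L : Nat}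
    (h : Border (t.reverse ++ [pvSep] ++ t) (t.reverse ++ [pvSep] ++ t).length L) :
    L ≤ t.length := by
  by_contra hL
  push Not at hL
  have hLm : L < t.length + 1 + t.length := by
    have := h.1; rwa [s_len] at this
  have hpt := h.2 t.length hL
  rw [s_getD_mid] at hpt
  have e : (t.reverse ++ [pvSep] ++ t).length - L + t.length =
      t.length + 1 + (t.length + t.length - L) := by
    rw [s_len]; omega
  rw [e, s_getD_right t (by omega)] at hpt
  exact getD_ne_sep t hsep (by omega) hpt.symm

lemma pal_iff (u : List Char) :
    u = u.reverse ↔ ∀ j, j < u.length → u.getD j pvSep = u.getD (u.length - 1 - j) pvSep := by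
  constructor
  · intro h j hj
    conv_lhs => rw [h]
    rw [List.getD_eq_getElem?_getD, List.getD_eq_getElem?_getD,
      List.getElem?_reverse (by simpa using hj)]
  · intro h
    apply List.ext_getElem?
    intro i
    by_cases hi : i < u.length
    · rw [List.getElem?_reverse (by simpa using hi)]
      have := h i hi
      rw [List.getD_eq_getElem _ _ hi, List.getD_eq_getElem _ _ (by omega)] at this
      rw [List.getElem?_eq_getElem hi, List.getElem?_eq_getElem (by omega), this]
    · rw [List.getElem?_eq_none (by omega), List.getElem?_eq_none (by simp; omega)]

lemma border_iff_pal (t : List Char) {L : Nat} (hL : L ≤ t.length) :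
    Border (t.reverse ++ [pvSep] ++ t) (t.reverse ++ [pvSep] ++ t).length L ↔
      t.drop (t.length - L) = (t.drop (t.length - L)).reverse := by
  have hul : (t.drop (t.length - L)).length = L := by
    simp only [List.length_drop]; omega
  rw [pal_iff]
  have hLm : L < (t.reverse ++ [pvSep] ++ t).length := by rw [s_len]; omega
  constructor
  · rintro ⟨-, hpt⟩ j hj
    rw [hul] at hj ⊢
    have := hpt j hj
    rw [s_getD_left t (by omega)] at this
    have e : (t.reverse ++ [pvSep] ++ t).length - L + j =
        t.length + 1 + (t.length - L + j) := by rw [s_len]; omega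
    rw [e, s_getD_right t (by omega)] at this
    rw [List.getD_eq_getElem?_getD, List.getD_eq_getElem?_getD,
      List.getElem?_drop, List.getElem?_drop,
      show t.length - L + (L - 1 - j) = t.length - 1 - j by omega,
      ← List.getD_eq_getElem?_getD, ← List.getD_eq_getElem?_getD]
    exact this.symm
  · intro hpal
    refine ⟨hLm, fun j hj => ?_⟩
    have := hpal j (by omega)
    rw [hul] at this
    rw [List.getD_eq_getElem?_getD, List.getD_eq_getElem?_getD,
      List.getElem?_drop, List.getElem?_drop,
      show t.length - L + (L - 1 - j) = t.length - 1 - j by omega,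
      ← List.getD_eq_getElem?_getD, ← List.getD_eq_getElem?_getD] at this
    rw [s_getD_left t (by omega),
      show (t.reverse ++ [pvSep] ++ t).length - L + j =
        t.length + 1 + (t.length - L + j) by rw [s_len]; omega,
      s_getD_right t (by omega)]
    exact this.symm

lemma find_eq (t : List Char) (hsep : pvSep ∉ t) :
    (Nat.find (pal_exists t)) =
      t.length - Fv (t.reverse ++ [pvSep] ++ t) (t.reverse ++ [pvSep] ++ t).length := by
  set s := t.reverse ++ [pvSep] ++ t with hs
  have hm : 0 < s.length := by rw [hs, s_len]; omega
  have hFb : Border s s.length (Fv s s.length) := Fv_border s hm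
  have hFn : Fv s s.length ≤ t.length := border_le_n t hsep hFb
  rw [Nat.find_eq_iff]
  constructor
  · exact (border_iff_pal t hFn).mp hFb
  · intro k hk hQ
    have hkn : k < t.length := by omega
    have hL : t.length - k ≤ t.length := by omega
    have hb : Border s s.length (t.length - k) := by
      rw [border_iff_pal t hL, show t.length - (t.length - k) = k by omega]
      exact hQ
    have := le_Fv s hb
    omega

-- ===== VERDICT (by name: the statement is the Claim_ definition above) =====
theorem min_palindrome_steps_spec : Claim_equal_min_palindrome_steps := by
  intro txt hdom
  unfold Spec_min_palindrome_steps min_palindrome_steps min_palindrome_steps_alt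
  have hsep : pvSep ∉ txt.toList := by
    intro hmem
    unfold Dom_min_palindrome_steps pvDomStr at hdom
    rw [List.all_eq_true] at hdom
    have := hdom pvSep hmem
    simp [pvDomChar, pvSep] at this
  have hms := s_len txt.toList
  have hmpos : 0 < (txt.toList.reverse ++ [pvSep] ++ txt.toList).length := by omega
  obtain ⟨-, hk, -⟩ := kmpLoop_inv (txt.toList.reverse ++ [pvSep] ++ txt.toList)
    ((txt.toList.reverse ++ [pvSep] ++ txt.toList).length - 1) (by omega)
  rw [show (txt.toList.reverse ++ [pvSep] ++ txt.toList).length - 1 + 1 =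
      (txt.toList.reverse ++ [pvSep] ++ txt.toList).length by omega] at hk
  rw [aLoop_eq txt.toList 0, find_eq txt.toList hsep]
  simp only
  rw [hk]
  have hFn : Fv (txt.toList.reverse ++ [pvSep] ++ txt.toList)
      (txt.toList.reverse ++ [pvSep] ++ txt.toList).length ≤ txt.toList.length :=
    border_le_n txt.toList hsep (Fv_border _ hmpos)
  omega
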